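-- pv_equiv track=rewrite | github.com/castilloglenn/Projects | GameOfLife.py | get_all_valid_coordinates
-- ===== SOURCE A (Python) =====
-- adjacent = [(-1, -1), (-1, 0), (-1, 1), (0, -1), (0, 1), (1, -1), (1, 0), (1, 1)]
--
-- def get_all_valid_coordinates(alive_coordinates):
--     cells = []
--     for coordinate in alive_coordinates:
--         for calculation in adjacent:
--             try:
--                 if (coordinate[0] + calculation[0], coordinate[1] + calculation[1]) not in cells:
--                     cells.append((coordinate[0] + calculation[0], coordinate[1] + calculation[1]))
--             except IndexError:
--                 pass
--     return cells
-- ===== SOURCE B (Python) =====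
-- adjacent = [(-1, -1), (-1, 0), (-1, 1), (0, -1), (0, 1), (1, -1), (1, 0), (1, 1)]
--
-- def get_all_valid_coordinates(alive_coordinates):
--     # Stage 1: generate the flat neighbor stream, no dedup at all.
--     candidates = []
--     for coordinate in alive_coordinates:
--         for calculation in adjacent:
--             try:
--                 candidates.append((coordinate[0] + calculation[0], coordinate[1] + calculation[1]))
--             except IndexError:
--                 pass
--     # Stage 2: selection-style dedup: repeatedly take the head and FILTER all
--     # its later duplicates out of the remaining stream (no membership test
--     # against the output, no dict/set; the stream itself shrinks).
--     out = []
--     while candidates: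
--         head = candidates[0]
--         out.append(head)
--         candidates = [x for x in candidates[1:] if x != head]
--     return out
-- ===== Notes on version B (the rewrite author's own statement) =====
-- stated objective: alternative
-- what changed: A dedups online while generating, scanning the growing OUTPUT with 'not in' before each append; B first generates the whole flat candidate stream and then dedups by selection: repeatedly emit the head and filter its duplicates out of the REMAINING stream, so there is no membership test against the output and no interleaving of generation and dedup.
import Mathlib
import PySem

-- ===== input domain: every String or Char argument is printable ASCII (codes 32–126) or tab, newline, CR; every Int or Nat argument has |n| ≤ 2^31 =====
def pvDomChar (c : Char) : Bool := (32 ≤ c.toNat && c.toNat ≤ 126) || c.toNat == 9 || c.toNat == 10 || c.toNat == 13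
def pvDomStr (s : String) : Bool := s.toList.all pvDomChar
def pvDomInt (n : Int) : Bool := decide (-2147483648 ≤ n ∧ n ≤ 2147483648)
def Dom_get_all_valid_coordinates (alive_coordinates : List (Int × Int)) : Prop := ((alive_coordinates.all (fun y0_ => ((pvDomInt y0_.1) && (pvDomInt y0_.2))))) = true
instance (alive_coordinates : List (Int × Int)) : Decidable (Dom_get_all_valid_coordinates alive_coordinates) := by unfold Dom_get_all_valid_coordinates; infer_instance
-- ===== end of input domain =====

-- B separates generation from dedup and replaces A's 'not in output' check by
-- selection-style filtering of the remaining candidate stream (alternative decomposition, same cost).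


-- ===== PORT A =====
def adjacent : List (Int × Int) :=
  [(-1, -1), (-1, 0), (-1, 1), (0, -1), (0, 1), (1, -1), (1, 0), (1, 1)]

-- Tuples are typed pairs, so coordinate[0]/[1] is .1/.2 and the IndexError branch is unreachable.
def get_all_valid_coordinates (alive_coordinates : List (Int × Int)) : List (Int × Int) :=
  alive_coordinates.foldl (fun cells coordinate =>
    adjacent.foldl (fun cells calculation =>
      if (coordinate.1 + calculation.1, coordinate.2 + calculation.2) ∈ cells then cells
      else cells ++ [(coordinate.1 + calculation.1, coordinate.2 + calculation.2)]) cells) []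

-- ===== PORT B =====
-- Source B's while loop: emit the head, filter its duplicates out of the remaining stream, repeat.
def selectDedup : List (Int × Int) → List (Int × Int)
  | [] => []
  | head :: rest => head :: selectDedup (rest.filter (fun x => x ≠ head))
termination_by l => l.length
decreasing_by simpa using Nat.lt_succ_of_le (le_trans (List.length_filter_le _ _) (Nat.le_of_eq rest.length_attach))

def get_all_valid_coordinates_alt (alive_coordinates : List (Int × Int)) : List (Int × Int) :=
  selectDedup
    (alive_coordinates.flatMap (fun coordinate =>
      adjacent.map (fun calculation =>
        (coordinate.1 + calculation.1, coordinate.2 + calculation.2))))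

-- ===== PRECONDITION & SPEC =====
def Spec_get_all_valid_coordinates (alive_coordinates : List (Int × Int)) (out : List (Int × Int)) : Prop := out = get_all_valid_coordinates_alt alive_coordinates
instance (alive_coordinates : List (Int × Int)) (out : List (Int × Int)) : Decidable (Spec_get_all_valid_coordinates alive_coordinates out) := by unfold Spec_get_all_valid_coordinates; infer_instance

-- ===== CLAIM (what is proved, stated in full; the proofs are below) =====
def Claim_equal_get_all_valid_coordinates : Prop := ∀ (alive_coordinates : List (Int × Int)), Dom_get_all_valid_coordinates alive_coordinates → Spec_get_all_valid_coordinates alive_coordinates (get_all_valid_coordinates alive_coordinates)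

-- ===== LEMMAS AND PROOFS =====

-- A's fold step is exactly Python-set insertion (PySem.Set.add).
theorem stepA_eq_add (cells : List (Int × Int)) (c : Int × Int) :
    (if c ∈ cells then cells else cells ++ [c]) = PySem.Set.add cells c := by
  simp [PySem.Set.add, PySem.Set.contains, List.contains_eq_mem]

-- Invariant: streaming first-occurrence dedup from any accumulator equals the
-- accumulator followed by selection dedup of the not-yet-seen candidates.
theorem foldl_add_eq_selectDedup (l : List (Int × Int)) : ∀ (acc : List (Int × Int)),
    l.foldl PySem.Set.add acc = acc ++ selectDedup (l.filter (fun y => decide (y ∉ acc))) := by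
  induction l with
  | nil => intro acc; simp [selectDedup]
  | cons x t ih =>
    intro acc
    by_cases hx : x ∈ acc
    · rw [List.foldl_cons, PySem.Set.add_of_mem hx, ih acc]
      simp [hx]
    · rw [List.foldl_cons, PySem.Set.add_of_not_mem hx, ih (acc ++ [x])]
      have hcomp : t.filter (fun y => decide (y ∉ acc ++ [x]))
          = (t.filter (fun y => decide (y ∉ acc))).filter (fun y => decide (y ≠ x)) := by
        rw [List.filter_filter]
        apply List.filter_congr
        intro y _
        by_cases h1 : y = x <;> by_cases h2 : y ∈ acc <;> simp [h1, h2]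
      rw [hcomp]
      simp [selectDedup, hx]

-- ===== VERDICT (by name: the statement is the Claim_ definition above) =====
theorem get_all_valid_coordinates_spec : Claim_equal_get_all_valid_coordinates := by
  intro alive_coordinates _
  unfold Spec_get_all_valid_coordinates get_all_valid_coordinates get_all_valid_coordinates_alt
  have hstream := foldl_add_eq_selectDedup
    (alive_coordinates.flatMap (fun coordinate =>
      adjacent.map (fun calculation =>
        (coordinate.1 + calculation.1, coordinate.2 + calculation.2)))) []
  simp only [List.not_mem_nil, not_false_iff, decide_true, List.filter_true, List.nil_append]
    at hstream
  rw [← hstream, List.foldl_flatMap]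
  apply PySem.List.foldl_congr_mem
  intro cells coordinate _
  rw [List.foldl_map]
  apply PySem.List.foldl_congr_mem
  intro cells' calculation _
  exact stepA_eq_add cells' _
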